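-- pv_equiv track=rewrite | github.com/JamieCH168/Python | Caesar Cipher.py | convert_X_to_XYX
-- ===== SOURCE A (Python) =====
-- def convert_X_to_XYX(text):
--       outcome = ''
--       for char in text:
--             if (char == 'X'):
--                   char = 'XYX'
--                   outcome += char
--             else:
--                   outcome += char
--       return outcome
-- ===== SOURCE B (Python) =====
-- def convert_X_to_XYX(text):
--     return 'XYX'.join(text.split('X'))
-- ===== Notes on version B (the rewrite author's own statement) =====
-- stated objective: idiomatic
-- what changed: Replaces the character-by-character accumulating loop with a partition-then-join decomposition (split on the marker character, rejoin with the replacement).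
import Mathlib
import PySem

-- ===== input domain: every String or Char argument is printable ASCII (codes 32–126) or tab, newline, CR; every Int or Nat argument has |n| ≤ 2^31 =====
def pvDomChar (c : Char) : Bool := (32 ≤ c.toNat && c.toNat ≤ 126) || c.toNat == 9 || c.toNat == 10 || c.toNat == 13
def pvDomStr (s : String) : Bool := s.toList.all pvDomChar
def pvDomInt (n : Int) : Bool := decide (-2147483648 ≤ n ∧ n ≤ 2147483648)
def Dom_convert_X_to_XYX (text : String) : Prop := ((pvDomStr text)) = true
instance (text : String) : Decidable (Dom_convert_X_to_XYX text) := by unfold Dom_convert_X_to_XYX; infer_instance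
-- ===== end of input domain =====

-- B replaces A's character-by-character accumulating loop by split-on-'X' / join-with-'XYX' (idiomatic).

-- ===== PORT A =====
-- A: outcome = ''; for char in text: outcome += 'XYX' if char == 'X' else char
def convert_X_to_XYX (text : String) : String :=
  String.ofList
    (text.toList.foldl
      (fun outcome char =>
        if char = 'X' then outcome ++ ['X', 'Y', 'X'] else outcome ++ [char])
      [])

-- ===== PORT B =====
-- B: return 'XYX'.join(text.split('X'))  (split with a non-empty separator = PySem.Chars.splitOn)
def convert_X_to_XYX_alt (text : String) : String :=
  String.ofList (PySem.Chars.join ['X', 'Y', 'X'] (PySem.Chars.splitOn text.toList ['X']))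

-- ===== PRECONDITION & SPEC =====
def Spec_convert_X_to_XYX (text : String) (out : String) : Prop := out = convert_X_to_XYX_alt text
instance (text : String) (out : String) : Decidable (Spec_convert_X_to_XYX text out) := by unfold Spec_convert_X_to_XYX; infer_instance

-- ===== CLAIM (what is proved, stated in full; the proofs are below) =====
def Claim_equal_convert_X_to_XYX : Prop := ∀ (text : String), Dom_convert_X_to_XYX text → Spec_convert_X_to_XYX text (convert_X_to_XYX text)

-- ===== LEMMAS AND PROOFS =====

-- first split piece and remaining pieces of splitting a char list on 'X'
def pvSp : List Char → List Char × List (List Char)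
  | [] => ([], [])
  | c :: t =>
    let r := pvSp t
    if c = 'X' then ([], r.1 :: r.2) else (c :: r.1, r.2)

theorem pvSp_go (l : List Char) : ∀ (fuel : Nat) (cur : List Char) (accs : List (List Char)),
    l.length ≤ fuel →
    PySem.Chars.splitOn.go ['X'] fuel l cur accs =
      accs.reverse ++ (cur.reverse ++ (pvSp l).1) :: (pvSp l).2 := by
  induction l with
  | nil =>
    intro fuel cur accs _
    cases fuel <;> simp [PySem.Chars.splitOn.go, pvSp]
  | cons c t ih =>
    intro fuel cur accs h
    cases fuel with
    | zero => simp at h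
    | succ fuel =>
      by_cases hc : c = 'X'
      · subst hc
        have hpre : List.isPrefixOf ['X'] ('X' :: t) = true := by
          simp [List.isPrefixOf]
        simp only [PySem.Chars.splitOn.go, hpre, if_true, List.length_cons,
          List.length_nil, Nat.zero_add, List.drop_succ_cons, List.drop_zero] at *
        rw [ih fuel [] (List.reverse cur :: accs) (by omega)]
        simp [pvSp]
      · have hpre : List.isPrefixOf ['X'] (c :: t) = false := by
          simp [List.isPrefixOf]
          exact fun h => hc h.symm
        simp only [PySem.Chars.splitOn.go, hpre] at *
        rw [ih fuel (c :: cur) accs (by simpa using Nat.le_of_succ_le_succ h)]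
        simp [pvSp, hc]

theorem pvSplitOn_eq (l : List Char) :
    PySem.Chars.splitOn l ['X'] = (pvSp l).1 :: (pvSp l).2 := by
  unfold PySem.Chars.splitOn
  rw [pvSp_go l (l.length + 1) [] [] (by omega)]
  simp

theorem pvJoin_sp (l : List Char) :
    PySem.Chars.join ['X', 'Y', 'X'] ((pvSp l).1 :: (pvSp l).2) =
      l.flatMap (fun c => if c = 'X' then ['X', 'Y', 'X'] else [c]) := by
  induction l with
  | nil => simp [pvSp, PySem.Chars.join, List.intercalate]
  | cons c t ih =>
    by_cases hc : c = 'X'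
    · subst hc
      simp only [pvSp, List.flatMap_cons, ← ih]
      simp [PySem.Chars.join, List.intercalate]
    · simp only [pvSp, if_neg hc, List.flatMap_cons, ← ih]
      simp only [PySem.Chars.join, List.intercalate]
      cases h2 : (pvSp t).2 <;> simp [List.intersperse]

theorem pvFoldl_eq_flatMap (l : List Char) (init : List Char) :
    l.foldl (fun outcome char => if char = 'X' then outcome ++ ['X', 'Y', 'X'] else outcome ++ [char]) init =
      init ++ l.flatMap (fun c => if c = 'X' then ['X', 'Y', 'X'] else [c]) := by
  induction l generalizing init with
  | nil => simp
  | cons c t ih =>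
    by_cases hc : c = 'X' <;> simp [List.foldl_cons, hc, ih, List.append_assoc]

-- ===== VERDICT (by name: the statement is the Claim_ definition above) =====
theorem convert_X_to_XYX_spec : Claim_equal_convert_X_to_XYX := by
  intro text _
  unfold Spec_convert_X_to_XYX convert_X_to_XYX convert_X_to_XYX_alt
  rw [pvSplitOn_eq, pvJoin_sp, pvFoldl_eq_flatMap]
  simp
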